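-- pv_equiv track=rewrite | github.com/muhenan/Python-Algo | Problems/leetcode1371.py | solution
-- ===== SOURCE A (Python) =====
-- def solution(S):
--     seen = {0: -1}
--     res = cur = 0
--     for i in range(len(S)):
--         cur ^= 2**(ord(S[i]) - ord('a'))
--         if cur in seen:
--             res = max(res, i - seen.get(cur))
--         else:
--             seen[cur] = i
--     return res
-- ===== SOURCE B (Python) =====
-- def solution(S):
--     n = len(S)
--     res = 0
--     for i in range(n):
--         mask = 0
--         for j in range(i, n):
--             mask ^= 1 << (ord(S[j]) - ord('a'))
--             if mask == 0:
--                 res = max(res, j - i + 1)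
--     return res
-- ===== Notes on version B (the rewrite author's own statement) =====
-- stated objective: alternative
-- what changed: Replaces A's single-pass prefix-xor-state first-occurrence dictionary with a direct brute-force scan of every window, maintaining a xor mask per start index and recording windows whose mask is zero.
import Mathlib
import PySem

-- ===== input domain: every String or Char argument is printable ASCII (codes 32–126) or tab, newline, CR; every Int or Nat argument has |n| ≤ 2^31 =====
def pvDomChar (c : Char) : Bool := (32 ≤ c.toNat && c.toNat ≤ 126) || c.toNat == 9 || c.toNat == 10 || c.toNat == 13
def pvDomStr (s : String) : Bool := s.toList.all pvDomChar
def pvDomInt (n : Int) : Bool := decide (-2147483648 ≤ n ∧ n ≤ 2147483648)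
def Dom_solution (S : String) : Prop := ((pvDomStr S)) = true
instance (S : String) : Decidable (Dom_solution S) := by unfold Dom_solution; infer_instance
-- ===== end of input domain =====

-- B replaces A's one-pass prefix-xor-state/first-occurrence dictionary by a brute-force scan of
-- every window (per-start xor mask), a genuinely different algorithm of higher cost (alternative,
-- not faster).

-- ===== PORT A =====
-- `2**(ord(S[i]) - ord('a'))` is ported with Nat subtraction in the exponent: exact for the
-- characters ≥ 'a' admitted by Pre_solution (on characters below 'a' Python A raises TypeError).
def solution (S : String) : Int :=
  ((PySem.List.pyRange 0 (PySem.Str.len S) 1).foldl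
    (fun (acc : PySem.Dict Int Int × Int × Int) (i : Int) =>
      let cur := PySem.Int.bxor acc.2.2
        ((2 : Int) ^ ((PySem.List.pyGetD S.toList i 'a').toNat - 97))
      if PySem.Dict.contains acc.1 cur then
        (acc.1, max acc.2.1 (i - (PySem.Dict.get? acc.1 cur).getD 0), cur)
      else
        (PySem.Dict.insert acc.1 cur i, acc.2.1, cur))
    (PySem.Dict.ofList [((0 : Int), (-1 : Int))], 0, 0)).2.1

-- ===== PORT B =====
-- `1 << (ord(S[j]) - ord('a'))` with Nat subtraction in the shift: exact for characters ≥ 'a'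
-- (on characters below 'a' Python B raises ValueError, also outside Pre_solution).
def solution_alt (S : String) : Int :=
  (PySem.List.pyRange 0 (PySem.Str.len S) 1).foldl
    (fun (res : Int) (i : Int) =>
      ((PySem.List.pyRange i (PySem.Str.len S) 1).foldl
        (fun (acc : Int × Int) (j : Int) =>
          let mask := PySem.Int.bxor acc.1
            ((1 : Int) <<< ((PySem.List.pyGetD S.toList j 'a').toNat - 97))
          if mask = 0 then (mask, max acc.2 (j - i + 1)) else (mask, acc.2))
        (0, res)).2)
    0

-- ===== PRECONDITION & SPEC =====
-- Pre_solution admits exactly the strings on which Python A returns: every character is ≥ 'a'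
-- (code 97). On any character below 'a', `2**(negative)` is a float and `int ^ float` makes A
-- raise TypeError (B raises ValueError there, from a negative shift count).
def Pre_solution (S : String) : Prop := S.toList.all (fun c => 97 ≤ c.toNat) = true
instance (S : String) : Decidable (Pre_solution S) := by unfold Pre_solution; infer_instance
def pvWitness_solution : String := "abba"
def Spec_solution (S : String) (out : Int) : Prop := out = solution_alt S
instance (S : String) (out : Int) : Decidable (Spec_solution S out) := by unfold Spec_solution; infer_instance

-- ===== CLAIM (what is proved, stated in full; the proofs are below) =====
def Claim_equal_solution : Prop := ∀ (S : String), Dom_solution S → Pre_solution S → Spec_solution S (solution S)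

-- ===== LEMMAS AND PROOFS =====

-- the xor "bit" contributed by one character, and the prefix-xor state after k characters
def pvBit (c : Char) : Nat := 2 ^ (c.toNat - 97)

def pvX (cs : List Char) : Nat := (cs.map pvBit).foldl (· ^^^ ·) 0

def pvP (cs : List Char) (k : Nat) : Nat := pvX (cs.take k)

theorem pvfold_xor_init (l : List Nat) (s : Nat) :
    l.foldl (· ^^^ ·) s = s ^^^ l.foldl (· ^^^ ·) 0 := by
  induction l generalizing s with
  | nil => simp
  | cons a l ih => simp only [List.foldl_cons, Nat.zero_xor]
                   rw [ih (s ^^^ a), ih a, Nat.xor_assoc]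

theorem pvX_append (xs ys : List Char) : pvX (xs ++ ys) = pvX xs ^^^ pvX ys := by
  simp only [pvX, List.map_append, List.foldl_append]
  exact pvfold_xor_init _ _

theorem pvP_succ (cs : List Char) (k : Nat) (h : k < cs.length) :
    pvP cs (k + 1) = pvP cs k ^^^ pvBit cs[k] := by
  rw [pvP, List.take_succ_eq_append_getElem h, pvX_append]
  simp [pvX, pvP, List.map_take]

theorem pvBit_cast (c : Char) :
    (2 : Int) ^ (c.toNat - 97) = ((pvBit c : Nat) : Int) := by
  simp [pvBit]

theorem pvShift_cast (c : Char) :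
    (1 : Int) <<< (c.toNat - 97) = ((pvBit c : Nat) : Int) := by
  simp [Int.shiftLeft_eq, pvBit]

-- ---------- A's loop, as a function of the number of completed iterations ----------
def pvStepA (cs : List Char) (acc : PySem.Dict Int Int × Int × Int) (i : Int) :
    PySem.Dict Int Int × Int × Int :=
  let cur := PySem.Int.bxor acc.2.2 ((2 : Int) ^ ((PySem.List.pyGetD cs i 'a').toNat - 97))
  if PySem.Dict.contains acc.1 cur then
    (acc.1, max acc.2.1 (i - (PySem.Dict.get? acc.1 cur).getD 0), cur)
  else
    (PySem.Dict.insert acc.1 cur i, acc.2.1, cur)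

def pvLoopA (cs : List Char) (k : Nat) : PySem.Dict Int Int × Int × Int :=
  (PySem.List.pyRange 0 (k : Int) 1).foldl (pvStepA cs)
    (PySem.Dict.ofList [((0 : Int), (-1 : Int))], 0, 0)

theorem solution_eq_loopA (S : String) :
    solution S = (pvLoopA S.toList S.toList.length).2.1 := by
  simp only [solution, pvLoopA, PySem.Str.len_eq]
  rfl

theorem pvLoopA_zero (cs : List Char) :
    pvLoopA cs 0 = (PySem.Dict.ofList [((0 : Int), (-1 : Int))], 0, 0) := by
  simp [pvLoopA, PySem.List.pyRange_one_eq_nil]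

theorem pvLoopA_succ (cs : List Char) (k : Nat) :
    pvLoopA cs (k + 1) = pvStepA cs (pvLoopA cs k) (k : Int) := by
  unfold pvLoopA
  push_cast
  rw [PySem.List.pyRange_one_succ_right (by positivity), List.foldl_append]
  rfl

theorem pvInvA (cs : List Char) (k : Nat) (hk : k ≤ cs.length) :
    (pvLoopA cs k).2.2 = ((pvP cs k : Nat) : Int) ∧
    (∀ s v, PySem.Dict.get? (pvLoopA cs k).1 s = some v →
      ∃ m, m ≤ k ∧ s = ((pvP cs m : Nat) : Int) ∧ v = (m : Int) - 1) ∧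
    (∀ m, m ≤ k → ∃ v, PySem.Dict.get? (pvLoopA cs k).1 ((pvP cs m : Nat) : Int) = some v ∧
      v ≤ (m : Int) - 1) ∧
    0 ≤ (pvLoopA cs k).2.1 ∧
    (∀ a b : Nat, a < b → b ≤ k → pvP cs a = pvP cs b →
      (b : Int) - (a : Int) ≤ (pvLoopA cs k).2.1) ∧
    (∀ c : Int, 0 ≤ c →
      (∀ a b : Nat, a < b → b ≤ cs.length → pvP cs a = pvP cs b → (b : Int) - (a : Int) ≤ c) →
      (pvLoopA cs k).2.1 ≤ c) := by
  induction k with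
  | zero =>
      rw [pvLoopA_zero]
      have hof : PySem.Dict.ofList [((0 : Int), (-1 : Int))] =
          (PySem.Dict.empty : PySem.Dict Int Int).insert 0 (-1) := rfl
      have hP0 : pvP cs 0 = 0 := by simp [pvP, pvX]
      refine ⟨by simp [hP0], ?_, ?_, le_rfl,
        fun a b h1 h2 _ => absurd (lt_of_lt_of_le h1 h2) (Nat.not_lt_zero a),
        fun c hc _ => hc⟩
      · intro s v hv
        rcases eq_or_ne s 0 with hs | hs
        · subst hs
          rw [hof, PySem.Dict.get?_insert_self] at hv
          exact ⟨0, le_rfl, by simp [hP0], by simpa using hv.symm⟩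
        · rw [hof, PySem.Dict.get?_insert_of_ne _ _ hs, PySem.Dict.get?_empty] at hv
          exact absurd hv (by simp)
      · intro m hm
        interval_cases m
        refine ⟨-1, ?_, by norm_num⟩
        rw [hP0, hof]
        exact_mod_cast PySem.Dict.get?_insert_self _ _ _
  | succ k ih =>
      have hm' : k < cs.length := by omega
      obtain ⟨ih1, ih2, ih3, ih4, ih5, ih6⟩ := ih (by omega)
      have hget : PySem.List.pyGetD cs (k : Int) 'a' = cs[k] := by
        simp [PySem.List.pyGetD_natCast, List.getD_eq_getElem?_getD, List.getElem?_eq_getElem hm']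
      have hcur : PySem.Int.bxor (pvLoopA cs k).2.2
          ((2 : Int) ^ ((PySem.List.pyGetD cs (k : Int) 'a').toNat - 97)) =
          ((pvP cs (k + 1) : Nat) : Int) := by
        rw [hget, pvBit_cast, ih1, PySem.Int.bxor_natCast, ← pvP_succ cs k hm']
      rw [pvLoopA_succ]
      simp only [pvStepA]
      rw [hcur, PySem.Dict.contains_eq_isSome_get?]
      by_cases hc : (PySem.Dict.get? (pvLoopA cs k).1 ((pvP cs (k + 1) : Nat) : Int)).isSome
      · obtain ⟨v, hv⟩ := Option.isSome_iff_exists.mp hc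
        rw [if_pos hc, hv]
        simp only [Option.getD_some]
        obtain ⟨m0, hm0, hkey0, hveq⟩ := ih2 _ _ hv
        refine ⟨by trivial, ?_, ?_, ?_, ?_, ?_⟩
        · intro s v' hv'
          obtain ⟨m, hm, h1, h2⟩ := ih2 s v' hv'
          exact ⟨m, by omega, h1, h2⟩
        · intro m hm
          rcases eq_or_lt_of_le hm with hm | hm
          · subst hm
            exact ⟨v, hv, by omega⟩
          · obtain ⟨v', hv', hle⟩ := ih3 m (by omega)
            exact ⟨v', hv', by omega⟩
        · exact le_trans ih4 (le_max_left _ _)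
        · intro a b hab hb hP
          rcases eq_or_lt_of_le hb with hb | hb
          · subst hb
            obtain ⟨v', hv', hle⟩ := ih3 a (by omega)
            rw [hP] at hv'
            rw [hv] at hv'
            injection hv' with hv'
            subst hv'
            apply le_trans _ (le_max_right _ _)
            omega
          · exact le_trans (ih5 a b hab (by omega) hP) (le_max_left _ _)
        · intro c hc0 hbound
          refine max_le (ih6 c hc0 hbound) ?_
          have hPm0 : pvP cs m0 = pvP cs (k + 1) := by exact_mod_cast hkey0.symm
          have := hbound m0 (k + 1) (by omega) (by omega) hPm0
          omega
      · rw [if_neg hc]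
        have hnone : PySem.Dict.get? (pvLoopA cs k).1 ((pvP cs (k + 1) : Nat) : Int) = none := by
          rcases h : PySem.Dict.get? (pvLoopA cs k).1 ((pvP cs (k + 1) : Nat) : Int) with _ | v
          · rfl
          · rw [h] at hc; simp at hc
        refine ⟨by trivial, ?_, ?_, ih4, ?_, fun c hc0 hbound => ih6 c hc0 hbound⟩
        · intro s v hv
          rcases eq_or_ne s ((pvP cs (k + 1) : Nat) : Int) with hs | hs
          · subst hs
            rw [PySem.Dict.get?_insert_self] at hv
            injection hv with hv
            exact ⟨k + 1, le_rfl, rfl, by omega⟩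
          · rw [PySem.Dict.get?_insert_of_ne _ _ hs] at hv
            obtain ⟨m, hm, h1, h2⟩ := ih2 s v hv
            exact ⟨m, by omega, h1, h2⟩
        · intro m hm
          rcases eq_or_lt_of_le hm with hm | hm
          · subst hm
            exact ⟨(k : Int), PySem.Dict.get?_insert_self _ _ _, by omega⟩
          · obtain ⟨v', hv', hle⟩ := ih3 m (by omega)
            have hne : ((pvP cs m : Nat) : Int) ≠ ((pvP cs (k + 1) : Nat) : Int) := by
              intro h
              rw [h, hnone] at hv'
              exact absurd hv' (by simp)
            rw [PySem.Dict.get?_insert_of_ne _ _ hne]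
            exact ⟨v', hv', hle⟩
        · intro a b hab hb hP
          rcases eq_or_lt_of_le hb with hb | hb
          · exfalso
            subst hb
            obtain ⟨v', hv', -⟩ := ih3 a (by omega)
            rw [hP, hnone] at hv'
            exact absurd hv' (by simp)
          · exact ih5 a b hab (by omega) hP

-- ---------- B's loops ----------
def pvStepB (cs : List Char) (i : Int) (acc : Int × Int) (j : Int) : Int × Int :=
  let mask := PySem.Int.bxor acc.1 ((1 : Int) <<< ((PySem.List.pyGetD cs j 'a').toNat - 97))
  if mask = 0 then (mask, max acc.2 (j - i + 1)) else (mask, acc.2)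

def pvInner (cs : List Char) (a : Nat) (res : Int) (m : Nat) : Int × Int :=
  (PySem.List.pyRange (a : Int) (m : Int) 1).foldl (pvStepB cs (a : Int)) (0, res)

def pvLoopB (cs : List Char) (k : Nat) : Int :=
  (PySem.List.pyRange 0 (k : Int) 1).foldl
    (fun res i => ((PySem.List.pyRange i (cs.length : Int) 1).foldl (pvStepB cs i) (0, res)).2) 0

theorem solution_alt_eq_loopB (S : String) :
    solution_alt S = pvLoopB S.toList S.toList.length := by
  simp only [solution_alt, pvLoopB, PySem.Str.len_eq]
  rfl

theorem pvLoopB_zero (cs : List Char) : pvLoopB cs 0 = 0 := by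
  simp [pvLoopB, PySem.List.pyRange_one_eq_nil]

theorem pvLoopB_succ (cs : List Char) (k : Nat) :
    pvLoopB cs (k + 1) = (pvInner cs k (pvLoopB cs k) cs.length).2 := by
  unfold pvLoopB pvInner
  push_cast
  rw [PySem.List.pyRange_one_succ_right (by positivity), List.foldl_append]
  rfl

theorem pvInvInner (cs : List Char) (a : Nat) (res : Int) (m : Nat)
    (ha : a ≤ m) (hm : m ≤ cs.length) :
    (pvInner cs a res m).1 = ((pvP cs a ^^^ pvP cs m : Nat) : Int) ∧
    res ≤ (pvInner cs a res m).2 ∧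
    (∀ b : Nat, a < b → b ≤ m → pvP cs a = pvP cs b → (b : Int) - (a : Int) ≤ (pvInner cs a res m).2) ∧
    (∀ c : Int, res ≤ c →
      (∀ b : Nat, a < b → b ≤ cs.length → pvP cs a = pvP cs b → (b : Int) - (a : Int) ≤ c) →
      (pvInner cs a res m).2 ≤ c) := by
  induction m, ha using Nat.le_induction with
  | base =>
      rw [pvInner, PySem.List.pyRange_one_eq_nil le_rfl]
      exact ⟨by simp, le_rfl, fun b h1 h2 _ => absurd (lt_of_lt_of_le h1 h2) (lt_irrefl a),
        fun c hc _ => hc⟩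
  | succ m ham ih =>
      have hm' : m < cs.length := by omega
      obtain ⟨ih1, ih2, ih3, ih4⟩ := ih (by omega)
      have hstep : pvInner cs a res (m + 1) = pvStepB cs (a : Int) (pvInner cs a res m) (m : Int) := by
        unfold pvInner
        push_cast
        rw [PySem.List.pyRange_one_succ_right (by exact_mod_cast ham), List.foldl_append]
        rfl
      have hget : PySem.List.pyGetD cs (m : Int) 'a' = cs[m] := by
        simp [PySem.List.pyGetD_natCast, List.getD_eq_getElem?_getD, List.getElem?_eq_getElem hm']
      have hmask : PySem.Int.bxor (pvInner cs a res m).1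
          ((1 : Int) <<< ((PySem.List.pyGetD cs (m : Int) 'a').toNat - 97)) =
          ((pvP cs a ^^^ pvP cs (m + 1) : Nat) : Int) := by
        rw [hget, pvShift_cast, ih1, PySem.Int.bxor_natCast, pvP_succ cs m hm', Nat.xor_assoc]
      rw [hstep]
      simp only [pvStepB]
      rw [hmask]
      by_cases h0 : ((pvP cs a ^^^ pvP cs (m + 1) : Nat) : Int) = 0
      · have hPP : pvP cs a = pvP cs (m + 1) := by
          have : pvP cs a ^^^ pvP cs (m + 1) = 0 := by exact_mod_cast h0
          exact Nat.xor_eq_zero_iff.mp this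
        rw [if_pos h0]
        refine ⟨rfl, le_trans ih2 (le_max_left _ _), ?_, ?_⟩
        · intro b hb1 hb2 hP
          rcases eq_or_lt_of_le hb2 with hb | hb
          · subst hb
            apply le_trans _ (le_max_right _ _)
            omega
          · exact le_trans (ih3 b hb1 (by omega) hP) (le_max_left _ _)
        · intro c hc hbound
          refine max_le (ih4 c hc hbound) ?_
          have := hbound (m + 1) (by omega) (by omega) hPP
          omega
      · rw [if_neg h0]
        refine ⟨rfl, ih2, ?_, fun c hc hbound => ih4 c hc hbound⟩
        intro b hb1 hb2 hP
        rcases eq_or_lt_of_le hb2 with hb | hb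
        · subst hb
          exact absurd (by exact_mod_cast congrArg (Nat.cast : Nat → Int) (Nat.xor_eq_zero_iff.mpr hP)) h0
        · exact ih3 b hb1 (by omega) hP

theorem pvInvB (cs : List Char) (k : Nat) (hk : k ≤ cs.length) :
    0 ≤ pvLoopB cs k ∧
    (∀ a b : Nat, a < k → a < b → b ≤ cs.length → pvP cs a = pvP cs b →
      (b : Int) - (a : Int) ≤ pvLoopB cs k) ∧
    (∀ c : Int, 0 ≤ c →
      (∀ a b : Nat, a < b → b ≤ cs.length → pvP cs a = pvP cs b → (b : Int) - (a : Int) ≤ c) →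
      pvLoopB cs k ≤ c) := by
  induction k with
  | zero =>
      rw [pvLoopB_zero]
      exact ⟨le_rfl, fun a b ha _ _ _ => absurd ha (Nat.not_lt_zero a), fun c hc _ => hc⟩
  | succ k ih =>
      obtain ⟨b0, blow, bup⟩ := ih (by omega)
      obtain ⟨-, i2, i3, i4⟩ := pvInvInner cs k (pvLoopB cs k) cs.length (by omega) le_rfl
      rw [pvLoopB_succ]
      refine ⟨le_trans b0 i2, ?_, ?_⟩
      · intro a b ha1 ha2 hb hP
        rcases Nat.lt_succ_iff_lt_or_eq.mp ha1 with ha | ha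
        · exact le_trans (blow a b ha ha2 hb hP) i2
        · subst ha
          exact i3 b ha2 hb hP
      · intro c hc hbound
        exact i4 c (bup c hc hbound) (fun b hb1 hb2 hP => hbound k b hb1 hb2 hP)

-- ===== VERDICT (by name: the statement is the Claim_ definition above) =====
theorem solution_spec : Claim_equal_solution := by
  intro S _hdom _hpre
  unfold Spec_solution
  rw [solution_eq_loopA, solution_alt_eq_loopB]
  obtain ⟨-, -, -, hA0, hAlow, hAup⟩ := pvInvA S.toList S.toList.length le_rfl
  obtain ⟨hB0, hBlow, hBup⟩ := pvInvB S.toList S.toList.length le_rfl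
  apply le_antisymm
  · exact hAup _ hB0 (fun a b hab hb hP =>
      hBlow a b (lt_of_lt_of_le hab hb) hab hb hP)
  · exact hBup _ hA0 (fun a b hab hb hP => hAlow a b hab hb hP)
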